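-- pv_equiv track=rewrite | github.com/jovans2/jovan-vllm | trace_shard_level_over_time.py | calculate_average_signal
-- ===== SOURCE A (Python) =====
-- def calculate_average_signal(signal_values, energy_values, idle_threshold, count_threshold):
--     segments = []
--     current_segment = []
--     in_idle = False
--     lower_values = []
--     lower_energy = []
--
--     for ind_e, value in enumerate(signal_values):
--         if value < idle_threshold:
--             lower_values.append(value)
--             lower_energy.append(energy_values[ind_e])
--             if not in_idle and len(lower_values) > count_threshold:
--                 in_idle = True
--         else:
--             if len(lower_values) < count_threshold:
--                 for val in lower_energy:
--                     current_segment.append(val)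
--             lower_values = []
--             lower_energy = []
--             if in_idle:
--                 if len(current_segment) > 0:
--                     segments.append(current_segment)  # End of an idle segment
--                     current_segment = []
--                 in_idle = False
--             current_segment.append(energy_values[ind_e])  # Add value to the current
--     segments.append(current_segment)
--     return segments
-- ===== SOURCE B (Python) =====
-- from itertools import groupby
--
--
-- def calculate_average_signal(signal_values, energy_values, idle_threshold, count_threshold):
--     # Collapse the input into consecutive runs keyed by "signal below idle_threshold",
--     # carrying each run's energies, then fold the runs into segments.
--     runs = [(is_low, [e for _, e in grp])
--             for is_low, grp in groupby(zip(signal_values, energy_values),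
--                                        key=lambda p: p[0] < idle_threshold)]
--     if runs and runs[-1][0]:
--         runs.pop()  # a trailing low run never influences the output
--     segments, current = [], []
--     for is_low, energies in runs:
--         if not is_low:
--             current += energies
--         elif len(energies) < count_threshold:
--             current += energies
--         elif len(energies) > count_threshold and current:
--             segments.append(current)
--             current = []
--     segments.append(current)
--     return segments
-- ===== Notes on version B (the rewrite author's own statement) =====
-- stated objective: alternative
-- what changed: B replaces A's single element-by-element loop with five pieces of mutable state (in_idle flag plus two growing buffer lists) by a two-phase decomposition: itertools.groupby first collapses the zipped (signal, energy) pairs into consecutive low/high runs, then a simple fold over the runs builds the segments.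
import Mathlib
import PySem

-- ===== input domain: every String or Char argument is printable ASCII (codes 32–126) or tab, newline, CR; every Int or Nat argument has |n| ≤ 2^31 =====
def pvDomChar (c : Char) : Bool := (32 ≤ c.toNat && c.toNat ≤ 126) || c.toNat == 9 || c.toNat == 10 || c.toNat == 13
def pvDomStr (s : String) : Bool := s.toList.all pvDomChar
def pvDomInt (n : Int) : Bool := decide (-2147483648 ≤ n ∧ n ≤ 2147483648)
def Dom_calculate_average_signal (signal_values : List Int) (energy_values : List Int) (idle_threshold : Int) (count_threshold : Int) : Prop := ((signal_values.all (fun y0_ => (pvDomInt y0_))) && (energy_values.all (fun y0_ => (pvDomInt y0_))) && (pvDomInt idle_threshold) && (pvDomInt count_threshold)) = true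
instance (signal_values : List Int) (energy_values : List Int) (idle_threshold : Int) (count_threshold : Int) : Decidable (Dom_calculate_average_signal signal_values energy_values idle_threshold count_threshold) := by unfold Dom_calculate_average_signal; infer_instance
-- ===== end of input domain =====

-- B replaces A's element-by-element loop with five pieces of state by a run-based
-- decomposition: group the (signal, energy) pairs into consecutive low/high runs first,
-- then fold the runs (objective: alternative decomposition, same O(n) cost).

-- ===== PORT A =====

-- One iteration of A's for-loop; state = (segments, current_segment, in_idle, lower_values, lower_energy)
def stepA (energy_values : List Int) (idle_threshold : Int) (count_threshold : Int)
    (st : List (List Int) × List Int × Bool × List Int × List Int) (p : Int × Int) :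
    List (List Int) × List Int × Bool × List Int × List Int :=
  let (segments, current, in_idle, lvals, lener) := st
  let (ind_e, value) := p
  if value < idle_threshold then
    let lvals' := lvals ++ [value]
    let lener' := lener ++ [PySem.List.pyGetD energy_values ind_e 0]
    let in_idle' := if ¬ in_idle ∧ ((lvals'.length : Int) > count_threshold) then true else in_idle
    (segments, current, in_idle', lvals', lener')
  else
    let current1 := if ((lvals.length : Int) < count_threshold) then current ++ lener else current
    let (segments2, current2) :=
      if in_idle ∧ current1.length > 0 then (segments ++ [current1], ([] : List Int))
      else (segments, current1)
    (segments2, current2 ++ [PySem.List.pyGetD energy_values ind_e 0], false, ([] : List Int), ([] : List Int))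

def calculate_average_signal (signal_values : List Int) (energy_values : List Int) (idle_threshold : Int) (count_threshold : Int) : List (List Int) :=
  let st := (PySem.List.enumerate signal_values).foldl
    (stepA energy_values idle_threshold count_threshold)
    (([] : List (List Int)), ([] : List Int), false, ([] : List Int), ([] : List Int))
  st.1 ++ [st.2.1]

-- ===== PORT B =====

-- span of the run with key b at the front of l (part of the hand-port of itertools.groupby)
def pvSpan (idle_threshold : Int) (b : Bool) : List (Int × Int) → List (Int × Int) × List (Int × Int)
  | [] => ([], [])
  | (v, e) :: rest =>
    if decide (v < idle_threshold) = b then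
      let p := pvSpan idle_threshold b rest
      ((v, e) :: p.1, p.2)
    else ([], (v, e) :: rest)

theorem pvSpan_snd_length (idle_threshold : Int) (b : Bool) (l : List (Int × Int)) :
    (pvSpan idle_threshold b l).2.length ≤ l.length := by
  induction l with
  | nil => simp [pvSpan]
  | cons x rest ih =>
    obtain ⟨v, e⟩ := x
    simp only [pvSpan]
    split
    · simpa using Nat.le_succ_of_le ih
    · simp

-- itertools.groupby over the zipped pairs, key = (signal < idle_threshold): list of (key, run)
def groupRuns (idle_threshold : Int) : List (Int × Int) → List (Bool × List (Int × Int))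
  | [] => []
  | (v, e) :: rest =>
    let b := decide (v < idle_threshold)
    let p := pvSpan idle_threshold b rest
    (b, (v, e) :: p.1) :: groupRuns idle_threshold p.2
termination_by l => l.length
decreasing_by
  simpa using Nat.lt_succ_of_le (pvSpan_snd_length idle_threshold (decide (v < idle_threshold)) rest)

-- Source B's "if runs and runs[-1][0]: runs.pop()": a trailing low run never influences the output
def pvTrim (runs : List (Bool × List Int)) : List (Bool × List Int) :=
  match runs.getLast? with
  | some (true, _) => runs.dropLast
  | _ => runs

-- one run of B's fold; state = (segments, current)
def stepB (count_threshold : Int) (st : List (List Int) × List Int) (r : Bool × List Int) :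
    List (List Int) × List Int :=
  let (segments, current) := st
  let (is_low, energies) := r
  if ¬ is_low then (segments, current ++ energies)
  else if ((energies.length : Int) < count_threshold) then (segments, current ++ energies)
  else if ((energies.length : Int) > count_threshold) ∧ current ≠ [] then (segments ++ [current], [])
  else (segments, current)

def calculate_average_signal_alt (signal_values : List Int) (energy_values : List Int) (idle_threshold : Int) (count_threshold : Int) : List (List Int) :=
  let runs := (groupRuns idle_threshold (signal_values.zip energy_values)).map
    (fun bg => (bg.1, bg.2.map Prod.snd))
  let st := (pvTrim runs).foldl (stepB count_threshold) (([] : List (List Int)), ([] : List Int))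
  st.1 ++ [st.2]

-- ===== PRECONDITION & SPEC =====
-- A evaluates energy_values[ind_e] at every index of signal_values, so it raises IndexError
-- exactly when energy_values is shorter than signal_values; Pre_ excludes those inputs.
def Pre_calculate_average_signal (signal_values : List Int) (energy_values : List Int) (idle_threshold : Int) (count_threshold : Int) : Prop :=
  signal_values.length ≤ energy_values.length
instance (signal_values : List Int) (energy_values : List Int) (idle_threshold : Int) (count_threshold : Int) : Decidable (Pre_calculate_average_signal signal_values energy_values idle_threshold count_threshold) := by unfold Pre_calculate_average_signal; infer_instance

def pvWitness_calculate_average_signal : List Int × List Int × Int × Int :=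
  ([5, 0, 0, 5, 0, 0, 0, 5], [1, 2, 3, 4, 5, 6, 7, 8], 3, 2)

def Spec_calculate_average_signal (signal_values : List Int) (energy_values : List Int) (idle_threshold : Int) (count_threshold : Int) (out : List (List Int)) : Prop := out = calculate_average_signal_alt signal_values energy_values idle_threshold count_threshold
instance (signal_values : List Int) (energy_values : List Int) (idle_threshold : Int) (count_threshold : Int) (out : List (List Int)) : Decidable (Spec_calculate_average_signal signal_values energy_values idle_threshold count_threshold out) := by unfold Spec_calculate_average_signal; infer_instance

-- ===== CLAIM (what is proved, stated in full; the proofs are below) =====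
def Claim_equal_calculate_average_signal : Prop := ∀ (signal_values : List Int) (energy_values : List Int) (idle_threshold : Int) (count_threshold : Int), Dom_calculate_average_signal signal_values energy_values idle_threshold count_threshold → Pre_calculate_average_signal signal_values energy_values idle_threshold count_threshold → Spec_calculate_average_signal signal_values energy_values idle_threshold count_threshold (calculate_average_signal signal_values energy_values idle_threshold count_threshold)

-- ===== LEMMAS AND PROOFS =====

-- A's loop body rewritten on (value, energy) pairs (proof-only bridge between the two ports)
def stepZ (idle_threshold : Int) (count_threshold : Int)
    (st : List (List Int) × List Int × Bool × List Int × List Int) (p : Int × Int) :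
    List (List Int) × List Int × Bool × List Int × List Int :=
  let (segments, current, in_idle, lvals, lener) := st
  let (value, energy) := p
  if value < idle_threshold then
    let lvals' := lvals ++ [value]
    let lener' := lener ++ [energy]
    let in_idle' := if ¬ in_idle ∧ ((lvals'.length : Int) > count_threshold) then true else in_idle
    (segments, current, in_idle', lvals', lener')
  else
    let current1 := if ((lvals.length : Int) < count_threshold) then current ++ lener else current
    let (segments2, current2) :=
      if in_idle ∧ current1.length > 0 then (segments ++ [current1], ([] : List Int))
      else (segments, current1)
    (segments2, current2 ++ [energy], false, ([] : List Int), ([] : List Int))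

theorem stepA_eq_stepZ (ev : List Int) (it ct : Int)
    (st : List (List Int) × List Int × Bool × List Int × List Int) (k : Nat) (v : Int)
    (h : k < ev.length) :
    stepA ev it ct st ((k : Int), v) = stepZ it ct st (v, ev[k]) := by
  obtain ⟨segs, cur, ii, vs, les⟩ := st
  have hget : PySem.List.pyGetD ev ((k : Nat) : Int) 0 = ev[k] := by
    simp [PySem.List.pyGetD_natCast, List.getD_eq_getElem?_getD, List.getElem?_eq_getElem h]
  simp only [stepA, stepZ, hget]

theorem foldA_enum (ev : List Int) (it ct : Int) :
    ∀ (sv : List Int) (k : Nat) (st : List (List Int) × List Int × Bool × List Int × List Int),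
      sv.length + k ≤ ev.length →
      (PySem.List.enumerate sv ((k : Nat) : Int)).foldl (stepA ev it ct) st
        = (sv.zip (ev.drop k)).foldl (stepZ it ct) st := by
  intro sv
  induction sv with
  | nil => intro k st _; simp [PySem.List.enumerate_nil]
  | cons v rest ih =>
    intro k st h
    have hk : k < ev.length := by simp at h; omega
    rw [PySem.List.enumerate_cons]
    rw [List.drop_eq_getElem_cons hk]
    simp only [List.zip_cons_cons, List.foldl_cons]
    rw [stepA_eq_stepZ ev it ct st k v hk]
    have hcast : ((k : Nat) : Int) + 1 = (((k + 1 : Nat)) : Int) := by push_cast; ring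
    rw [hcast, ih (k + 1) _ (by simp at h ⊢; omega)]

theorem stepZ_high_boundary (it ct : Int) (v e : Int) (h : ¬ v < it)
    (segs : List (List Int)) (cur : List Int) :
    stepZ it ct (segs, cur, false, [], []) (v, e) = (segs, cur ++ [e], false, [], []) := by
  simp [stepZ, h]

theorem idle_update (ct : Int) (n : Nat) :
    (if ¬ decide (((n : Int) > ct) ∧ 0 < n) ∧ (((n + 1 : Nat) : Int) > ct) then true
     else decide (((n : Int) > ct) ∧ 0 < n))
    = decide ((((n + 1 : Nat) : Int) > ct) ∧ 0 < n + 1) := by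
  by_cases h1 : (((n + 1 : Nat) : Int) > ct) <;>
    by_cases h2 : ((n : Int) > ct) ∧ 0 < n <;>
      simp [h1, h2] <;> push_cast at * <;> omega

theorem foldZ_high (it ct : Int) :
    ∀ (l : List (Int × Int)) (segs : List (List Int)) (cur : List Int),
      l.foldl (stepZ it ct) (segs, cur, false, [], [])
        = (pvSpan it false l).2.foldl (stepZ it ct)
            (segs, cur ++ (pvSpan it false l).1.map Prod.snd, false, [], []) := by
  intro l
  induction l with
  | nil => intro segs cur; simp [pvSpan]
  | cons x rest ih =>
    obtain ⟨v, e⟩ := x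
    intro segs cur
    by_cases h : v < it
    · simp [pvSpan, h]
    · simp only [pvSpan, decide_eq_false h, List.foldl_cons, if_pos]
      rw [stepZ_high_boundary it ct v e h segs cur]
      rw [ih segs (cur ++ [e])]
      simp [List.append_assoc]

theorem foldZ_low (it ct : Int) :
    ∀ (l : List (Int × Int)) (segs : List (List Int)) (cur vs les : List Int),
      vs.length = les.length →
      l.foldl (stepZ it ct) (segs, cur, decide (((les.length : Int) > ct) ∧ 0 < les.length), vs, les)
        = (pvSpan it true l).2.foldl (stepZ it ct)
            (segs, cur,
             decide ((((les.length + (pvSpan it true l).1.length : Nat) : Int) > ct)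
               ∧ 0 < les.length + (pvSpan it true l).1.length),
             vs ++ (pvSpan it true l).1.map Prod.fst,
             les ++ (pvSpan it true l).1.map Prod.snd) := by
  intro l
  induction l with
  | nil => intro segs cur vs les _; simp [pvSpan]
  | cons x rest ih =>
    obtain ⟨v, e⟩ := x
    intro segs cur vs les hlen
    by_cases h : v < it
    · have hr : pvSpan it true ((v, e) :: rest)
          = ((v, e) :: (pvSpan it true rest).1, (pvSpan it true rest).2) := by
        simp [pvSpan, h]
      rw [hr]
      dsimp only
      rw [List.foldl_cons]
      have hstep : stepZ it ct
            (segs, cur, decide (((les.length : Int) > ct) ∧ 0 < les.length), vs, les) (v, e)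
          = (segs, cur, decide (((((les.length + 1 : Nat)) : Int) > ct) ∧ 0 < les.length + 1),
             vs ++ [v], les ++ [e]) := by
        simp only [stepZ, if_pos h]
        have hl : (vs ++ [v]).length = les.length + 1 := by simp [hlen]
        rw [hl, idle_update ct les.length]
      have hIH := ih segs cur (vs ++ [v]) (les ++ [e]) (by simp [hlen])
      simp only [List.length_append, List.length_cons, List.length_nil, Nat.zero_add] at hIH
      rw [hstep, hIH]
      congr 1
      simp [List.append_assoc, decide_eq_decide]
      omega
    · simp [pvSpan, h]

theorem stepZ_after_low (it ct : Int) (v' e' : Int) (h : ¬ v' < it)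
    (segs : List (List Int)) (cur vs les : List Int)
    (hlen : vs.length = les.length) (hpos : 0 < les.length) :
    stepZ it ct (segs, cur, decide (((les.length : Int) > ct) ∧ 0 < les.length), vs, les) (v', e')
      = ((stepB ct (segs, cur) (true, les)).1,
         (stepB ct (segs, cur) (true, les)).2 ++ [e'], false, [], []) := by
  simp only [stepZ, stepB, if_neg h, hlen]
  by_cases hlt : (les.length : Int) < ct
  · have hgt : ¬ ((les.length : Int) > ct) := by omega
    simp [hlt, hgt]
  · by_cases hgt : (les.length : Int) > ct
    · by_cases hcur : cur = []
      · subst hcur; simp [hlt, hgt, hpos]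
      · have hc : cur.length > 0 := by
          cases cur with
          | nil => exact absurd rfl hcur
          | cons a t => simp
        simp [hlt, hgt, hpos, hcur, hc]
    · simp [hlt, hgt, hpos]

theorem pvSpan_snd_head (it : Int) (b : Bool) :
    ∀ (l : List (Int × Int)) (v e : Int) (r : List (Int × Int)),
      (pvSpan it b l).2 = (v, e) :: r → decide (v < it) = !b := by
  intro l
  induction l with
  | nil => intro v e r h; simp [pvSpan] at h
  | cons x rest ih =>
    obtain ⟨w, f⟩ := x
    intro v e r h
    by_cases hw : decide (w < it) = b
    · rw [pvSpan] at h
      simp only [hw, if_pos] at h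
      exact ih v e r h
    · rw [pvSpan] at h
      simp only [hw, if_neg, if_false] at h
      rw [List.cons.injEq] at h
      obtain ⟨h1, _⟩ := h
      rw [Prod.mk.injEq] at h1
      obtain ⟨hv, _⟩ := h1
      subst hv
      cases hb : decide (w < it) <;> cases b <;> simp_all

theorem pvTrim_cons₂ (x y : Bool × List Int) (t : List (Bool × List Int)) :
    pvTrim (x :: y :: t) = x :: pvTrim (y :: t) := by
  unfold pvTrim
  rw [List.getLast?_cons_cons]
  rcases h : (y :: t).getLast? with _ | ⟨b, es⟩
  · simp at h
  · cases b <;> simp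

theorem groupRuns_cons (it : Int) (v e : Int) (rest : List (Int × Int)) :
    groupRuns it ((v, e) :: rest)
      = (decide (v < it), (v, e) :: (pvSpan it (decide (v < it)) rest).1)
          :: groupRuns it (pvSpan it (decide (v < it)) rest).2 := by
  rw [groupRuns]

theorem foldZ_low_start (it ct : Int) (l : List (Int × Int))
    (segs : List (List Int)) (cur : List Int) :
    l.foldl (stepZ it ct) (segs, cur, false, [], [])
      = (pvSpan it true l).2.foldl (stepZ it ct)
          (segs, cur,
           decide (((((pvSpan it true l).1.length : Nat) : Int) > ct)
             ∧ 0 < (pvSpan it true l).1.length),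
           (pvSpan it true l).1.map Prod.fst,
           (pvSpan it true l).1.map Prod.snd) := by
  have h := foldZ_low it ct l segs cur [] [] rfl
  simpa using h

theorem pvMain (it ct : Int) :
    ∀ (n : Nat) (l : List (Int × Int)), l.length ≤ n →
      ∀ (segs : List (List Int)) (cur : List Int),
        ((l.foldl (stepZ it ct) (segs, cur, false, [], [])).1,
         (l.foldl (stepZ it ct) (segs, cur, false, [], [])).2.1)
          = (pvTrim ((groupRuns it l).map (fun bg => (bg.1, bg.2.map Prod.snd)))).foldl
              (stepB ct) (segs, cur) := by
  intro n
  induction n with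
  | zero =>
    intro l hl segs cur
    cases l with
    | nil => simp [groupRuns, pvTrim]
    | cons x t => simp at hl
  | succ n ih =>
    intro l hl segs cur
    cases l with
    | nil => simp [groupRuns, pvTrim]
    | cons x rest =>
      obtain ⟨v, e⟩ := x
      have hrest : rest.length ≤ n := by simp at hl; omega
      by_cases hb : v < it
      · -- low run at the front
        have hr : pvSpan it true ((v, e) :: rest)
            = ((v, e) :: (pvSpan it true rest).1, (pvSpan it true rest).2) := by
          simp [pvSpan, hb]
        rw [groupRuns_cons, decide_eq_true hb]
        rw [foldZ_low_start it ct ((v, e) :: rest) segs cur, hr]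
        dsimp only
        have hlen2 : (pvSpan it true rest).2.length ≤ n :=
          le_trans (pvSpan_snd_length it true rest) hrest
        rcases hq2 : (pvSpan it true rest).2 with _ | ⟨⟨v', e'⟩, r'⟩
        · -- trailing low run: A leaves it in the buffers, B pops it
          simp [pvTrim, groupRuns]
        · have hv' : decide (v' < it) = false := by
            have := pvSpan_snd_head it true rest v' e' r' hq2
            simpa using this
          have hv'p : ¬ v' < it := by simpa using of_decide_eq_false hv'
          rw [List.foldl_cons]
          have hL : ((v, e) :: (pvSpan it true rest).1).length
              = (((v, e) :: (pvSpan it true rest).1).map Prod.snd).length := by simp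
          rw [hL]
          rw [stepZ_after_low it ct v' e' hv'p segs cur _ _ (by simp) (by simp)]
          rw [← stepZ_high_boundary it ct v' e' hv'p
            (stepB ct (segs, cur) (true, ((v, e) :: (pvSpan it true rest).1).map Prod.snd)).1
            (stepB ct (segs, cur) (true, ((v, e) :: (pvSpan it true rest).1).map Prod.snd)).2]
          rw [← List.foldl_cons]
          rw [ih ((v', e') :: r') (by rw [← hq2]; exact hlen2)]
          -- B side: trim passes over the head run because another run follows
          rw [groupRuns_cons]
          simp only [hv', List.map_cons]
          rw [pvTrim_cons₂]
          simp [List.foldl_cons]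
      · -- high run at the front
        have hr : pvSpan it false ((v, e) :: rest)
            = ((v, e) :: (pvSpan it false rest).1, (pvSpan it false rest).2) := by
          simp [pvSpan, hb]
        rw [groupRuns_cons, decide_eq_false hb]
        rw [foldZ_high it ct ((v, e) :: rest) segs cur, hr]
        dsimp only
        have hlen2 : (pvSpan it false rest).2.length ≤ n :=
          le_trans (pvSpan_snd_length it false rest) hrest
        rcases hq2 : (pvSpan it false rest).2 with _ | ⟨⟨v', e'⟩, r'⟩
        · simp [pvTrim, groupRuns, stepB]
        · rw [ih ((v', e') :: r') (by rw [← hq2]; exact hlen2)]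
          rw [groupRuns_cons]
          simp only [List.map_cons]
          rw [pvTrim_cons₂]
          simp [List.foldl_cons, stepB]

-- ===== VERDICT (by name: the statement is the Claim_ definition above) =====
theorem calculate_average_signal_spec : Claim_equal_calculate_average_signal := by
  intro sv ev it ct _ hpre
  unfold Spec_calculate_average_signal
  simp only [calculate_average_signal, calculate_average_signal_alt]
  have h0 : PySem.List.enumerate sv = PySem.List.enumerate sv (((0 : Nat) : Int)) := by norm_num
  rw [h0, foldA_enum ev it ct sv 0 _ (by simpa using hpre)]
  rw [List.drop_zero]
  have h2 := pvMain it ct (sv.zip ev).length (sv.zip ev) le_rfl [] []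
  have e1 := congrArg Prod.fst h2
  have e2 := congrArg Prod.snd h2
  dsimp only at e1 e2
  rw [e1, e2]
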